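-- pv_equiv track=rewrite | github.com/evilsizord/mapindexer | bsp_stats.py | estimate_rooms
-- ===== SOURCE A (Python) =====
-- MIN_ROOM_LEAFS = 3                 # cluster must contain >= N leafs
--
-- def estimate_rooms(leaf_clusters):
--     """
--     Heuristic:
--     - Group leafs by visibility cluster
--     - Remove clusters with minimal representation
--     - Resulting clusters approximate rooms / areas
--     """
--
--     if not leaf_clusters:
--         return 0
--
--     cluster_counts = {}
--
--     for c in leaf_clusters:
--         cluster_counts[c] = cluster_counts.get(c, 0) + 1
--
--     # Filter weak clusters (noise, corridors)
--     valid_clusters = [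
--         c for c, count in cluster_counts.items()
--         if count >= MIN_ROOM_LEAFS
--     ]
--
--     return len(valid_clusters)
-- ===== SOURCE B (Python) =====
-- MIN_ROOM_LEAFS = 3
--
--
-- def estimate_rooms(leaf_clusters):
--     # Sort-then-scan: count runs of equal elements of length >= MIN_ROOM_LEAFS.
--     if not leaf_clusters:
--         return 0
--     s = sorted(leaf_clusters)
--     rooms = 0
--     i = 0
--     n = len(s)
--     while i < n:
--         j = i + 1
--         while j < n and s[j] == s[i]:
--             j += 1
--         if j - i >= MIN_ROOM_LEAFS:
--             rooms += 1
--         i = j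
--     return rooms
-- ===== Notes on version B (the rewrite author's own statement) =====
-- stated objective: alternative
-- what changed: Replaces the hash-count dictionary with sorting a copy of the list and scanning it once, counting runs of equal elements of length >= 3.
import Mathlib
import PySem

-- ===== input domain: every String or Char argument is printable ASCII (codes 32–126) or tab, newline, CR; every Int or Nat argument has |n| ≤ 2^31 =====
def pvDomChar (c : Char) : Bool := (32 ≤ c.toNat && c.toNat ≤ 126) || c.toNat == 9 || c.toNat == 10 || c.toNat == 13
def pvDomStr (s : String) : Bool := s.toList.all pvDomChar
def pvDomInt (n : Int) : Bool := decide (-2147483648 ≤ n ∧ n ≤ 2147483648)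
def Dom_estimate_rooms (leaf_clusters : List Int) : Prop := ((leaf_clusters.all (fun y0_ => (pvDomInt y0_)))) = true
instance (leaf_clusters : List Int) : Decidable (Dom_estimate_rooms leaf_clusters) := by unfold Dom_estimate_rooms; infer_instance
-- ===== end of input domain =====

-- B is an alternative algorithm: sort-then-scan runs instead of a count dict; same result.

-- ===== PORT A =====
def estimate_rooms (leaf_clusters : List Int) : Int :=
  if leaf_clusters = [] then 0
  else
    let cluster_counts : PySem.Dict Int Int :=
      leaf_clusters.foldl (fun d c => d.insert c (d.getD c 0 + 1)) PySem.Dict.empty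
    let valid_clusters : List Int :=
      (cluster_counts.items.filter (fun p => decide (3 ≤ p.2))).map (·.1)
    (valid_clusters.length : Int)

-- ===== PORT B =====
-- the inner while loop: the run of elements equal to the current one is the
-- takeWhile prefix; the scan resumes at the dropWhile suffix
def runScan : List Int → Int
  | [] => 0
  | x :: rest =>
      (if 3 ≤ (rest.takeWhile (fun y => y == x)).length + 1 then (1 : Int) else 0)
        + runScan (rest.dropWhile (fun y => y == x))
termination_by l => l.length
decreasing_by
  simpa using Nat.lt_succ_of_le (List.length_dropWhile_le _ _)

def estimate_rooms_alt (leaf_clusters : List Int) : Int :=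
  if leaf_clusters = [] then 0
  else runScan (PySem.List.sorted leaf_clusters (fun x => x) false)

-- ===== PRECONDITION & SPEC =====
def Spec_estimate_rooms (leaf_clusters : List Int) (out : Int) : Prop := out = estimate_rooms_alt leaf_clusters
instance (leaf_clusters : List Int) (out : Int) : Decidable (Spec_estimate_rooms leaf_clusters out) := by unfold Spec_estimate_rooms; infer_instance

-- ===== CLAIM (what is proved, stated in full; the proofs are below) =====
def Claim_equal_estimate_rooms : Prop := ∀ (leaf_clusters : List Int), Dom_estimate_rooms leaf_clusters → Spec_estimate_rooms leaf_clusters (estimate_rooms leaf_clusters)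

-- ===== LEMMAS AND PROOFS =====

-- runScan on a sorted list counts the distinct elements of multiplicity ≥ 3:
-- there is a nodup enumeration ks of the elements with the filtered length equal to runScan.
lemma dropWhile_head_false {α : Type} (p : α → Bool) : ∀ (l : List α) (y : α) (d' : List α),
    l.dropWhile p = y :: d' → p y = false := by
  intro l
  induction l with
  | nil => intro y d' h; simp [List.dropWhile] at h
  | cons a l ih =>
      intro y d' h
      rw [List.dropWhile_cons] at h
      split at h
      · exact ih y d' h
      · cases h
        exact Bool.eq_false_iff.mpr ‹¬ _›

lemma runScan_spec : ∀ (n : Nat) (s : List Int), s.length ≤ n → s.Pairwise (· ≤ ·) →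
    ∃ ks : List Int, ks.Nodup ∧ (∀ k, k ∈ ks ↔ k ∈ s) ∧
      runScan s = ((ks.filter (fun k => decide (3 ≤ (s.count k : Int)))).length : Int) := by
  intro n
  induction n with
  | zero =>
      intro s hs _
      have : s = [] := List.length_eq_zero_iff.mp (Nat.le_zero.mp hs)
      subst this
      exact ⟨[], by simp, by simp, by simp [runScan]⟩
  | succ n ih =>
      intro s hs hp
      match s with
      | [] => exact ⟨[], by simp, by simp, by simp [runScan]⟩
      | x :: rest =>
        obtain ⟨t, d, ht, hd⟩ :
            ∃ t d, t = rest.takeWhile (fun y => y == x) ∧ d = rest.dropWhile (fun y => y == x) :=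
          ⟨_, _, rfl, rfl⟩
        have hrest : t ++ d = rest := by rw [ht, hd]; exact List.takeWhile_append_dropWhile
        have hx_le : ∀ y ∈ rest, x ≤ y := (List.pairwise_cons.mp hp).1
        have hrp : rest.Pairwise (· ≤ ·) := (List.pairwise_cons.mp hp).2
        have hdp : d.Pairwise (· ≤ ·) := by
          rw [hd]; exact hrp.sublist (List.dropWhile_sublist _)
        have ht_all : ∀ a ∈ t, a = x := by
          intro a ha
          rw [ht] at ha
          simpa using List.mem_takeWhile_imp ha
        have hd_gt : ∀ z ∈ d, x < z := by
          intro z hz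
          cases hdm : d with
          | nil => rw [hdm] at hz; simp at hz
          | cons y d' =>
            have hddrop : rest.dropWhile (fun y => y == x) = y :: d' := by rw [← hd, hdm]
            have hyne : (y == x) = false := dropWhile_head_false (fun y => y == x) rest y d' hddrop
            have hy_mem : y ∈ rest := by
              have : y ∈ d := by rw [hdm]; simp
              rw [hd] at this
              exact (List.dropWhile_sublist _).mem this
            have hyx : x ≠ y := fun h => by rw [h] at hyne; rw [beq_self_eq_true] at hyne; exact Bool.true_eq_false.mp hyne
            have hxy : x < y := lt_of_le_of_ne (hx_le y hy_mem) hyx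
            rw [hdm] at hz
            rcases List.mem_cons.mp hz with h | h
            · exact h ▸ hxy
            · exact lt_of_lt_of_le hxy ((List.pairwise_cons.mp (hdm ▸ hdp)).1 z h)
        have hx_not_d : x ∉ d := fun h => lt_irrefl x (hd_gt x h)
        have h1 : t.count x = t.length := List.count_eq_length.mpr (fun b hb => ((ht_all b hb).symm ▸ rfl))
        have h2 : d.count x = 0 := List.count_eq_zero.mpr hx_not_d
        have hcount_x : (x :: rest).count x = t.length + 1 := by
          rw [← hrest]
          simp [List.count_append, h1, h2]
        have hcount_ne : ∀ k, k ≠ x → (x :: rest).count k = d.count k := by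
          intro k hk
          have h1' : t.count k = 0 := List.count_eq_zero.mpr (fun h => hk (ht_all k h))
          rw [← hrest]
          simp [List.count_append, h1', Ne.symm hk]
        have hdlen : d.length ≤ n := by
          have h1'' : d.length ≤ rest.length := by rw [hd]; exact List.length_dropWhile_le _ _
          have h2'' : rest.length + 1 ≤ n + 1 := by simpa using hs
          omega
        obtain ⟨ks', hnd', hmem', heq'⟩ := ih d hdlen hdp
        refine ⟨x :: ks', ?_, ?_, ?_⟩
        · exact List.nodup_cons.mpr ⟨fun h => hx_not_d ((hmem' x).mp h), hnd'⟩
        · intro k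
          constructor
          · intro h
            rcases List.mem_cons.mp h with h | h
            · simp [h]
            · have : k ∈ d := (hmem' k).mp h
              exact List.mem_cons.mpr (Or.inr ((hrest ▸ (List.mem_append.mpr (Or.inr this)))))
          · intro h
            rcases List.mem_cons.mp h with h | h
            · simp [h]
            · rw [← hrest] at h
              rcases List.mem_append.mp h with h | h
              · simp [ht_all k h]
              · exact List.mem_cons.mpr (Or.inr ((hmem' k).mpr h))
        · rw [runScan, ← ht, ← hd]
          have hfx : (decide (3 ≤ (((x :: rest).count x : Nat) : Int))) = decide (3 ≤ t.length + 1) := by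
            rw [hcount_x]; simp; omega
          have hrestfilter :
              ks'.filter (fun k => decide (3 ≤ (((x :: rest).count k : Nat) : Int)))
                = ks'.filter (fun k => decide (3 ≤ ((d.count k : Nat) : Int))) := by
            apply List.filter_congr
            intro k hk
            have hkd : k ∈ d := (hmem' k).mp hk
            have hkne : k ≠ x := fun h => hx_not_d (h ▸ hkd)
            rw [hcount_ne k hkne]
          rw [List.filter_cons]
          simp only [hfx, hrestfilter]
          by_cases h3 : 3 ≤ t.length + 1
          · rw [heq']
            simp [h3]
            ring
          · rw [heq']
            simp [h3]

-- A's dict loop is Counter, and its filtered items are the distinct elements with count ≥ 3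
lemma estimate_rooms_eq (xs : List Int) :
    estimate_rooms xs =
      if xs = [] then 0
      else (((PySem.Set.ofList xs).filter (fun k => decide (3 ≤ ((xs.count k : Nat) : Int)))).length : Int) := by
  unfold estimate_rooms
  by_cases h : xs = []
  · simp [h]
  · simp only [if_neg h]
    rw [PySem.Dict.foldl_insert_getD_add_one_eq_counter]
    congr 1
    rw [PySem.Dict.items_counter]
    rw [List.filter_map, List.map_map]
    simp [Function.comp_def]

-- ===== VERDICT (by name: the statement is the Claim_ definition above) =====
theorem estimate_rooms_spec : Claim_equal_estimate_rooms := by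
  intro xs _
  unfold Spec_estimate_rooms
  rw [estimate_rooms_eq]
  unfold estimate_rooms_alt
  by_cases h : xs = []
  · simp [h]
  · simp only [if_neg h]
    set s := PySem.List.sorted xs (fun x => x) false with hsdef
    have hperm : s.Perm xs := PySem.List.sorted_perm xs (fun x => x) false
    have hpair : s.Pairwise (· ≤ ·) := by
      simpa using PySem.List.sorted_pairwise xs (fun x => x)
    obtain ⟨ks, hnd, hmem, heq⟩ := runScan_spec s.length s le_rfl hpair
    rw [heq]
    have hcnt : ∀ k, s.count k = xs.count k := fun k => hperm.count_eq k
    have hks : ks.Perm (PySem.Set.ofList xs) := by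
      rw [List.perm_ext_iff_of_nodup hnd (PySem.Set.nodup_ofList xs)]
      intro a
      rw [hmem a, PySem.Set.mem_ofList, hperm.mem_iff]
    have : (ks.filter (fun k => decide (3 ≤ ((s.count k : Nat) : Int)))).Perm
        ((PySem.Set.ofList xs).filter (fun k => decide (3 ≤ ((xs.count k : Nat) : Int)))) := by
      have h1 : (ks.filter (fun k => decide (3 ≤ ((s.count k : Nat) : Int))))
          = ks.filter (fun k => decide (3 ≤ ((xs.count k : Nat) : Int))) := by
        apply List.filter_congr; intro k _; rw [hcnt k]
      rw [h1]
      exact hks.filter _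
    rw [this.length_eq]
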